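-- pv_equiv track=rewrite | github.com/Homap/ostrich_PAR_analysis | code/analysis/diversity/popgene/basecount.py | seq_length
-- ===== SOURCE A (Python) =====
-- def seq_length(sequence):
--     """Return heterozygosity from
--             any sequence as a string """
--     # The first thing is to test the input
--     if not isinstance(sequence, str):
--             raise Exception("Sequence is not a string")
--     homozygote='ATCG'
--     SNPs='RYSWKMBDHV'
--     homozygote_count = len([base.upper() for base in sequence if base.upper() in homozygote])
--     SNPs_count = len([base.upper() for base in sequence if base.upper() in SNPs])
--     return(homozygote_count+SNPs_count)
-- ===== SOURCE B (Python) =====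
-- def seq_length(sequence):
--     """Return heterozygosity from
--             any sequence as a string """
--     if not isinstance(sequence, str):
--         raise Exception("Sequence is not a string")
--     counts = {}
--     for base in sequence:
--         b = base.upper()
--         counts[b] = counts.get(b, 0) + 1
--     return sum(counts.get(b, 0) for b in 'ATCGRYSWKMBDHV')
-- ===== Notes on version B (the rewrite author's own statement) =====
-- stated objective: idiomatic
-- what changed: B builds a frequency table of the upper-cased sequence in one pass and then sums the tallies of the 14 valid bases by looping over the fixed alphabet, instead of scanning the sequence twice with membership tests.
import Mathlib
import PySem

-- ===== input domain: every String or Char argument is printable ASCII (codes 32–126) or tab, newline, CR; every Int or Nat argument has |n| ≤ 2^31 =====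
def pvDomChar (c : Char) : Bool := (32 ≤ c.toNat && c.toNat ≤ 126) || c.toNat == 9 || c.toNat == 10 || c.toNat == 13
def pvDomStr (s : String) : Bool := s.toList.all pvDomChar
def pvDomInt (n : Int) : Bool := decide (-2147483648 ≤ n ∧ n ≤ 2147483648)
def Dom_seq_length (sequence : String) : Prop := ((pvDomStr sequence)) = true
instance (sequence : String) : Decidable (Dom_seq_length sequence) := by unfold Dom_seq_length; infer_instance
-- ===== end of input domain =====

-- B builds a one-pass frequency table of the upper-cased sequence and sums the tallies
-- of the fixed 14-letter valid-base alphabet (idiomatic histogram), instead of A's two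
-- filtered scans of the sequence; same O(n) cost, equivalent on all strings.


-- ===== PORT A =====
-- 'base.upper() in homozygote' on a 1-char string is char membership; ported as list contains.
def seq_length (sequence : String) : Int :=
  let homozygote := "ATCG"
  let SNPs := "RYSWKMBDHV"
  let homozygote_count : Int :=
    ((sequence.toList.filter (fun base => homozygote.toList.contains (PySem.Chars.upperChar base))).map
      (fun base => PySem.Chars.upperChar base)).length
  let SNPs_count : Int :=
    ((sequence.toList.filter (fun base => SNPs.toList.contains (PySem.Chars.upperChar base))).map
      (fun base => PySem.Chars.upperChar base)).length
  homozygote_count + SNPs_count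

-- ===== PORT B =====
def seq_length_alt (sequence : String) : Int :=
  let counts : PySem.Dict Char Int :=
    sequence.toList.foldl (fun d base => d.modify (PySem.Chars.upperChar base) 0 (· + 1)) PySem.Dict.empty
  ("ATCGRYSWKMBDHV".toList.map (fun b => counts.getD b 0)).sum

-- ===== PRECONDITION & SPEC =====
def Spec_seq_length (sequence : String) (out : Int) : Prop := out = seq_length_alt sequence
instance (sequence : String) (out : Int) : Decidable (Spec_seq_length sequence out) := by unfold Spec_seq_length; infer_instance

-- ===== CLAIM (what is proved, stated in full; the proofs are below) =====
def Claim_equal_seq_length : Prop := ∀ (sequence : String), Dom_seq_length sequence → Spec_seq_length sequence (seq_length sequence)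

-- ===== LEMMAS AND PROOFS =====

-- counting membership in c :: cs splits into counting c and counting membership in cs, when c ∉ cs
theorem pv_countP_cons_contains (c : Char) (cs u : List Char) (hc : c ∉ cs) :
    u.countP (fun x => (c :: cs).contains x) = u.count c + u.countP (fun x => cs.contains x) := by
  induction u with
  | nil => simp
  | cons x u ih =>
    simp only [List.countP_cons, List.count_cons, ih]
    by_cases hxc : x = c
    · subst hxc
      simp [hc]
      omega
    · by_cases hxs : x ∈ cs <;> simp [hxc, hxs] <;> try omega

-- summing per-letter counts over a duplicate-free alphabet equals one membership count
theorem pv_sum_count_eq_countP (cs u : List Char) (h : cs.Nodup) :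
    (cs.map (fun b => ((u.count b : Int)))).sum = (u.countP cs.contains : Int) := by
  induction cs with
  | nil =>
    simp only [List.map_nil, List.sum_nil]
    rw [show (List.contains ([] : List Char)) = fun _ => false from rfl]
    simp
  | cons c cs ih =>
    rcases List.nodup_cons.mp h with ⟨hc, hcs⟩
    rw [List.map_cons, List.sum_cons, ih hcs, pv_countP_cons_contains c cs u hc]
    push_cast
    ring

-- ===== VERDICT (by name: the statement is the Claim_ definition above) =====
theorem seq_length_spec : Claim_equal_seq_length := by
  intro sequence _
  unfold Spec_seq_length seq_length seq_length_alt
  simp only [List.length_map]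
  set u := sequence.toList.map PySem.Chars.upperChar with hu
  have hfold : sequence.toList.foldl
      (fun (d : PySem.Dict Char Int) base => d.modify (PySem.Chars.upperChar base) 0 (· + 1)) PySem.Dict.empty
      = u.foldl (fun d x => d.modify x 0 (· + 1)) PySem.Dict.empty := by
    rw [hu, List.foldl_map]
  have hcnt : ∀ p : Char → Bool,
      ((sequence.toList.filter (fun base => p (PySem.Chars.upperChar base))).length : Int)
        = (u.countP p : Int) := by
    intro p
    rw [hu, List.countP_map, ← List.countP_eq_length_filter]
    rfl
  rw [hfold, hcnt, hcnt,
    show ("ATCGRYSWKMBDHV".toList) = "ATCG".toList ++ "RYSWKMBDHV".toList from by decide,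
    List.map_append, List.sum_append]
  have h1 := pv_sum_count_eq_countP "ATCG".toList u (by decide)
  have h2 := pv_sum_count_eq_countP "RYSWKMBDHV".toList u (by decide)
  simp only [PySem.Dict.getD_foldl_modify_add_one, PySem.Dict.getD_empty, zero_add] at *
  omega
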